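-- pv_equiv track=rewrite | github.com/1Jayakrishnan/GFG--POTD | JUN 2025 GFG/Group Balls by Sequence.py | validgroup
-- ===== SOURCE A (Python) =====
-- from collections import Counter
--
-- def validgroup(arr, k):
--     n = len(arr)
--     if n % k != 0:
--         return False
--
--     count = Counter(arr)
--     keys = sorted(count.keys())
--
--     for num in keys:
--         if count[num] > 0:
--             freq = count[num]
--             for i in range(num, num + k):
--                 if count[i] < freq:
--                     return False
--                 count[i] -= freq
--     return True
-- ===== SOURCE B (Python) =====
-- from collections import Counter
--
-- def validgroup(arr, k):
--     if len(arr) % k != 0: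
--         return False
--     count = Counter(arr)
--     open_total = 0   # number of open groups; all of them need the value `nxt` next
--     nxt = 0          # meaningful only while open_total > 0
--     q = []           # queue of (last value of group, how many groups), ends increasing
--     for v in sorted(count):
--         if open_total > 0 and v != nxt:
--             return False
--         have = count[v]
--         if have < open_total:
--             return False
--         if have > open_total:
--             q.append((v + k - 1, have - open_total))
--         open_total = have
--         if q and q[0][0] == v:
--             open_total -= q.pop(0)[1]
--         nxt = v + 1
--     return open_total == 0
-- ===== Notes on version B (the rewrite author's own statement) =====
-- stated objective: alternative
-- what changed: A consumes a mutated Counter, rescanning and decrementing the whole k-value window for every distinct value; B never mutates the Counter and instead makes one pass over the sorted distinct values carrying the number of open groups and a queue of (end value, group count) pairs, so each value is touched once.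
-- outside the precondition, e.g. on validgroup([1, 2], -2): A returns True, B returns False
import Mathlib
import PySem

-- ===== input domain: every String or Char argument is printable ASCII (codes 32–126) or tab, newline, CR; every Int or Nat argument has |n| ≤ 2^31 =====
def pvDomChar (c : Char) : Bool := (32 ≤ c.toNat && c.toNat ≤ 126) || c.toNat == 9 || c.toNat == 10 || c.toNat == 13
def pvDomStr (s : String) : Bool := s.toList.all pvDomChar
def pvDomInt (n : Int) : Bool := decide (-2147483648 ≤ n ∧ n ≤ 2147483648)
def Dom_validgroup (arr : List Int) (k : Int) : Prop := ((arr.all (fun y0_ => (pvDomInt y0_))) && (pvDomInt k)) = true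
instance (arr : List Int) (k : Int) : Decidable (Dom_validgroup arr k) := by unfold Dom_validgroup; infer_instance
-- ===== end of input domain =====

-- B replaces A's per-key consumption of the whole k-window in a mutated Counter by a single
-- pass over the sorted distinct values that carries the number of open groups and a queue of
-- (end value, group count) pairs; equal returns proved for k ≥ 1 (see Pre_).

-- ===== PORT A =====
-- inner loop: 'for i in range(num, num+k): if count[i] < freq: return False; count[i] -= freq'
def validgroupInner (freq : Int) : List Int → PySem.Dict Int Int → Option (PySem.Dict Int Int)
  | [], count => some count
  | i :: rest, count =>
      if count.getD i 0 < freq then none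
      else validgroupInner freq rest (count.insert i (count.getD i 0 - freq))

-- outer loop: 'for num in keys: …' with early return False
def validgroupOuter (k : Int) : List Int → PySem.Dict Int Int → Bool
  | [], _ => true
  | num :: rest, count =>
      if count.getD num 0 > 0 then
        let freq := count.getD num 0
        match validgroupInner freq (PySem.List.pyRange num (num + k) 1) count with
        | none => false
        | some count' => validgroupOuter k rest count'
      else validgroupOuter k rest count

def validgroup (arr : List Int) (k : Int) : Bool :=
  let n : Int := arr.length
  if PySem.Int.mod n k ≠ 0 then false
  else
    let count := PySem.Dict.counter arr
    let keys := PySem.List.sorted count.keys (fun x => x) false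
    validgroupOuter k keys count

-- ===== PORT B =====
-- 'if q and q[0][0] == v: open_total = have - q.pop(0)[1]' (else open_total = have)
def validgroupPop (v haveV : Int) : List (Int × Int) → Int × List (Int × Int)
  | [] => (haveV, [])
  | (e, c) :: t => if e = v then (haveV - c, t) else (haveV, (e, c) :: t)

def validgroupAltLoop (k : Int) (count : PySem.Dict Int Int) :
    List Int → Int → Int → List (Int × Int) → Bool
  | [], openT, _, _ => openT == 0
  | v :: rest, openT, nxt, q =>
      if openT > 0 ∧ v ≠ nxt then false
      else
        let haveV := count.getD v 0
        if haveV < openT then false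
        else
          let q1 := if haveV > openT then q ++ [(v + k - 1, haveV - openT)] else q
          let s := validgroupPop v haveV q1
          validgroupAltLoop k count rest s.1 (v + 1) s.2

def validgroup_alt (arr : List Int) (k : Int) : Bool :=
  if PySem.Int.mod (arr.length : Int) k ≠ 0 then false
  else
    let count := PySem.Dict.counter arr
    validgroupAltLoop k count (PySem.List.sorted count.keys (fun x => x) false) 0 0 []

-- ===== PRECONDITION & SPEC =====
-- Pre_ restricts to the task's natural domain k ≥ 1: k = 0 raises ZeroDivisionError in both
-- programs, and a negative group size lies outside the task's domain (there A happens to return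
-- True whenever k divides len(arr), while B returns False).
def Pre_validgroup (arr : List Int) (k : Int) : Prop := 1 ≤ k
instance (arr : List Int) (k : Int) : Decidable (Pre_validgroup arr k) := by unfold Pre_validgroup; infer_instance
def pvWitness_validgroup : List Int × Int := ([1, 2, 3, 1, 2, 3], 3)

def Spec_validgroup (arr : List Int) (k : Int) (out : Bool) : Prop := out = validgroup_alt arr k
instance (arr : List Int) (k : Int) (out : Bool) : Decidable (Spec_validgroup arr k out) := by unfold Spec_validgroup; infer_instance

-- ===== CLAIM (what is proved, stated in full; the proofs are below) =====
def Claim_equal_validgroup : Prop := ∀ (arr : List Int) (k : Int), Dom_validgroup arr k → Pre_validgroup arr k → Spec_validgroup arr k (validgroup arr k)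

-- ===== LEMMAS AND PROOFS =====

-- total demand of the open-group queue
def pvQsum (q : List (Int × Int)) : Int := (q.map (·.2)).sum
-- pending demand at value u : open groups whose last needed value is ≥ u
def pvPend (q : List (Int × Int)) (u : Int) : Int := ((q.filter (fun p => u ≤ p.1)).map (·.2)).sum

theorem pvPend_cons (p : Int × Int) (t : List (Int × Int)) (u : Int) :
    pvPend (p :: t) u = (if u ≤ p.1 then p.2 else 0) + pvPend t u := by
  by_cases h : u ≤ p.1 <;> simp [pvPend, h]

theorem pvPend_append (q r : List (Int × Int)) (u : Int) :
    pvPend (q ++ r) u = pvPend q u + pvPend r u := by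
  simp [pvPend, List.filter_append]

theorem pvPend_single (e c u : Int) :
    pvPend [(e, c)] u = if u ≤ e then c else 0 := by
  by_cases h : u ≤ e <;> simp [pvPend, h]

theorem pvQsum_pos (q : List (Int × Int)) (hq : q ≠ []) (hpos : ∀ p ∈ q, 0 < p.2) :
    0 < pvQsum q := by
  cases q with
  | nil => simp at hq
  | cons p t =>
    have h1 := hpos p List.mem_cons_self
    have h2 : 0 ≤ (t.map (·.2)).sum := by
      apply List.sum_nonneg; intro x hx
      obtain ⟨p', hp', rfl⟩ := List.mem_map.mp hx
      exact le_of_lt (hpos p' (List.mem_cons_of_mem _ hp'))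
    simp [pvQsum]; omega

theorem pvPend_le_qsum (q : List (Int × Int)) (u : Int) (hpos : ∀ p ∈ q, 0 < p.2) :
    pvPend q u ≤ pvQsum q := by
  induction q with
  | nil => simp [pvPend, pvQsum]
  | cons p t ih =>
    have ht := ih (fun p hp => hpos p (List.mem_cons_of_mem _ hp))
    have hp0 := hpos p (List.mem_cons_self)
    by_cases h : u ≤ p.1 <;> simp [pvPend, pvQsum, h] at * <;> omega

theorem pvPend_eq_qsum (q : List (Int × Int)) (u : Int) (h : ∀ p ∈ q, u ≤ p.1) :
    pvPend q u = pvQsum q := by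
  have : q.filter (fun p => u ≤ p.1) = q := List.filter_eq_self.mpr (by
    intro p hp; simpa using h p hp)
  simp [pvPend, pvQsum, this]

-- A's inner window loop: fails iff some value in the (duplicate-free) window is short,
-- otherwise subtracts freq at every window value.
theorem validgroupInner_spec (freq : Int) (r : List Int) (hnd : r.Nodup) (dA : PySem.Dict Int Int) :
    ((∃ i ∈ r, dA.getD i 0 < freq) ∧ validgroupInner freq r dA = none) ∨
    ((∀ i ∈ r, freq ≤ dA.getD i 0) ∧ ∃ d', validgroupInner freq r dA = some d' ∧
      ∀ u, d'.getD u 0 = dA.getD u 0 - (if u ∈ r then freq else 0)) := by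
  induction r generalizing dA with
  | nil =>
    right
    exact ⟨by simp, dA, rfl, by simp⟩
  | cons i rest ih =>
    by_cases hlt : dA.getD i 0 < freq
    · left
      exact ⟨⟨i, List.mem_cons_self, hlt⟩, by simp [validgroupInner, hlt]⟩
    · have hni : i ∉ rest := (List.nodup_cons.mp hnd).1
      have hnd' : rest.Nodup := (List.nodup_cons.mp hnd).2
      have heq : ∀ u, (dA.insert i (dA.getD i 0 - freq)).getD u 0
          = if u = i then dA.getD i 0 - freq else dA.getD u 0 := by
        intro u; rw [PySem.Dict.getD_insert]
      rcases ih hnd' (dA.insert i (dA.getD i 0 - freq)) with ⟨⟨j, hj, hjlt⟩, hnone⟩ | ⟨hall, d', hsome, hd'⟩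
      · left
        refine ⟨⟨j, List.mem_cons_of_mem _ hj, ?_⟩, by simp [validgroupInner, hlt, hnone]⟩
        · rw [heq j] at hjlt
          have : j ≠ i := fun h => hni (h ▸ hj)
          simpa [this] using hjlt
      · right
        constructor
        · intro j hj
          rcases List.mem_cons.mp hj with rfl | hj'
          · omega
          · have hji : j ≠ i := fun h => hni (h ▸ hj')
            have := hall j hj'
            rw [heq j] at this; simpa [hji] using this
        · refine ⟨d', by simp [validgroupInner, hlt, hsome], ?_⟩
          intro u
          rw [hd' u, heq u]
          by_cases hui : u = i
          · subst hui; simp [hni]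
          · by_cases hur : u ∈ rest <;> simp [hui, hur, List.mem_cons]

-- one step of B: total/positivity/bounds/order of the queue are preserved and the
-- pending demand grows by exactly the newly opened groups on the window (v, v+k-1]
theorem pvStep (k v haveV openT : Int) (q : List (Int × Int))
    (hk : 1 ≤ k)
    (hsum : openT = pvQsum q)
    (hpos : ∀ p ∈ q, 0 < p.2)
    (hbnd : ∀ p ∈ q, v ≤ p.1 ∧ p.1 ≤ v + k - 2)
    (hpw : q.Pairwise (fun p p' => p.1 < p'.1))
    (hle : openT ≤ haveV) :
    (validgroupPop v haveV (if haveV > openT then q ++ [(v + k - 1, haveV - openT)] else q)).1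
      = pvQsum (validgroupPop v haveV (if haveV > openT then q ++ [(v + k - 1, haveV - openT)] else q)).2 ∧
    (∀ p ∈ (validgroupPop v haveV (if haveV > openT then q ++ [(v + k - 1, haveV - openT)] else q)).2, 0 < p.2) ∧
    (∀ p ∈ (validgroupPop v haveV (if haveV > openT then q ++ [(v + k - 1, haveV - openT)] else q)).2,
      v + 1 ≤ p.1 ∧ p.1 ≤ (v + 1) + k - 2) ∧
    (validgroupPop v haveV (if haveV > openT then q ++ [(v + k - 1, haveV - openT)] else q)).2.Pairwise
      (fun p p' => p.1 < p'.1) ∧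
    (∀ u, v < u → pvPend (validgroupPop v haveV (if haveV > openT then q ++ [(v + k - 1, haveV - openT)] else q)).2 u
      = pvPend q u + (if u ≤ v + k - 1 then haveV - openT else 0)) := by
  set q1 := if haveV > openT then q ++ [(v + k - 1, haveV - openT)] else q with hq1
  have sum1 : pvQsum q1 = haveV := by
    by_cases happ : haveV > openT
    · simp [hq1, happ, pvQsum]
      simp [pvQsum] at hsum; omega
    · have : haveV = openT := by omega
      simp [hq1, ← hsum, this]
  have pos1 : ∀ p ∈ q1, 0 < p.2 := by
    intro p hp
    by_cases happ : haveV > openT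
    · rw [hq1] at hp; simp [happ] at hp
      rcases hp with hp | hp
      · exact hpos p hp
      · simp [hp]; omega
    · simp [hq1, happ] at hp; exact hpos p hp
  have bnd1 : ∀ p ∈ q1, v ≤ p.1 ∧ p.1 ≤ v + k - 1 := by
    intro p hp
    by_cases happ : haveV > openT
    · rw [hq1] at hp; simp [happ] at hp
      rcases hp with hp | hp
      · have := hbnd p hp; omega
      · simp [hp]; omega
    · simp [hq1, happ] at hp; have := hbnd p hp; omega
  have pw1 : q1.Pairwise (fun p p' => p.1 < p'.1) := by
    by_cases happ : haveV > openT
    · rw [hq1]; simp only [happ, if_pos]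
      refine List.pairwise_append.mpr ⟨hpw, List.pairwise_singleton _ _, ?_⟩
      intro p hp p' hp'
      simp at hp'; rw [hp']
      have := hbnd p hp; omega
    · simp [hq1, happ]; exact hpw
  have pend1 : ∀ u, v < u → pvPend q1 u = pvPend q u + (if u ≤ v + k - 1 then haveV - openT else 0) := by
    intro u hu
    by_cases happ : haveV > openT
    · rw [hq1]; simp only [happ, if_pos, pvPend_append, pvPend_single]
    · have : haveV = openT := by omega
      simp [hq1, this]
  clear_value q1
  rcases hq1' : q1 with _ | ⟨⟨e, c⟩, t⟩
  · subst hq1'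
    have h0 : haveV = 0 := by simpa [pvQsum] using sum1.symm
    refine ⟨by simp [validgroupPop, pvQsum, h0], by simp [validgroupPop], by simp [validgroupPop], by simp [validgroupPop], ?_⟩
    intro u hu
    have := pend1 u hu
    simpa [validgroupPop] using this
  · subst hq1'
    by_cases hev : e = v
    · have hs : validgroupPop v haveV ((e, c) :: t) = (haveV - c, t) := by simp [validgroupPop, hev]
      rw [hs]
      have hsumt : pvQsum ((e, c) :: t) = c + pvQsum t := by simp [pvQsum]
      refine ⟨by simp; omega, ?_, ?_, ?_, ?_⟩
      · intro p hp; exact pos1 p (List.mem_cons_of_mem _ hp)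
      · intro p hp
        have h1 := (List.pairwise_cons.mp pw1).1 p hp
        have h2 := bnd1 p (List.mem_cons_of_mem _ hp)
        simp at h1; omega
      · exact (List.pairwise_cons.mp pw1).2
      · intro u hu
        have := pend1 u hu
        rw [pvPend_cons] at this
        have hne : ¬ (u ≤ e) := by simp; omega
        simpa [hne] using this
    · have hs : validgroupPop v haveV ((e, c) :: t) = (haveV, (e, c) :: t) := by simp [validgroupPop, hev]
      rw [hs]; dsimp only
      refine ⟨sum1.symm, pos1, ?_, pw1, pend1⟩
      intro p hp
      rcases List.mem_cons.mp hp with rfl | hp'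
      · have := bnd1 (e, c) List.mem_cons_self; simp at this ⊢; omega
      · have h1 := (List.pairwise_cons.mp pw1).1 p hp'
        have h2 := bnd1 (e, c) List.mem_cons_self
        have h3 := bnd1 p (List.mem_cons_of_mem _ hp')
        simp at h1 h2; omega

-- B-side soundness: a successful run of B's loop means every pending demand fits the counts
theorem validgroupAlt_sound (k : Int) (hk : 1 ≤ k) (c : PySem.Dict Int Int)
    (hg : ∀ u, 0 ≤ c.getD u 0) :
    ∀ (ks : List Int) (openT nxt : Int) (q : List (Int × Int)),
    ks.Pairwise (· < ·) →
    (∀ v ∈ ks, nxt ≤ v) →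
    openT = pvQsum q →
    (∀ p ∈ q, 0 < p.2) →
    (∀ p ∈ q, nxt ≤ p.1 ∧ p.1 ≤ nxt + k - 2) →
    q.Pairwise (fun p p' => p.1 < p'.1) →
    validgroupAltLoop k c ks openT nxt q = true →
    ∀ u, nxt ≤ u → pvPend q u ≤ c.getD u 0 := by
  intro ks
  induction ks with
  | nil =>
    intro openT nxt q _ _ hsum hpos _ _ hrun u hu
    have h0 : openT = 0 := by simpa [validgroupAltLoop] using hrun
    have hq : q = [] := by
      rcases hq : q with _ | ⟨p, t⟩
      · rfl
      · exfalso
        have := pvQsum_pos q (by rw [hq]; simp) hpos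
        omega
    subst hq
    simpa [pvPend] using hg u
  | cons v rest ih =>
    intro openT nxt q hpw hge hsum hpos hbnd hqpw hrun u hu
    have hgap : ¬ (openT > 0 ∧ v ≠ nxt) := by
      intro h; simp [validgroupAltLoop, h] at hrun
    have hsh : ¬ (c.getD v 0 < openT) := by
      intro h; simp [validgroupAltLoop, hgap, h] at hrun
    have hle : openT ≤ c.getD v 0 := by omega
    have hvq : q ≠ [] → v = nxt := by
      intro hq
      by_contra hne
      have := pvQsum_pos q hq hpos
      exact hgap ⟨by omega, hne⟩
    have hbnd' : ∀ p ∈ q, v ≤ p.1 ∧ p.1 ≤ v + k - 2 := by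
      intro p hp
      have hq : q ≠ [] := by intro h; subst h; simp at hp
      rw [hvq hq]; exact hbnd p hp
    obtain ⟨s1, s2, s3, s4, s5⟩ := pvStep k v (c.getD v 0) openT q hk hsum hpos hbnd' hqpw hle
    have hrun' : validgroupAltLoop k c rest
        (validgroupPop v (c.getD v 0) (if c.getD v 0 > openT then q ++ [(v + k - 1, c.getD v 0 - openT)] else q)).1
        (v + 1)
        (validgroupPop v (c.getD v 0) (if c.getD v 0 > openT then q ++ [(v + k - 1, c.getD v 0 - openT)] else q)).2
        = true := by
      simpa [validgroupAltLoop, hgap, hsh] using hrun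
    have hrest : ∀ w ∈ rest, v + 1 ≤ w := by
      intro w hw
      have := (List.pairwise_cons.mp hpw).1 w hw; omega
    have IH := ih _ (v + 1) _ (List.pairwise_cons.mp hpw).2 hrest s1 s2 s3 s4 hrun'
    by_cases hq : q = []
    · subst hq; simpa [pvPend] using hg u
    · have hvn := hvq hq
      by_cases huv : u ≤ v
      · have huveq : u = v := by omega
        subst huveq
        calc pvPend q u ≤ pvQsum q := pvPend_le_qsum q u hpos
        _ ≤ c.getD u 0 := by omega
      · have hu' : v < u := by omega
        have h5 := s5 u hu'
        have h2 := IH u (by omega)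
        rw [h5] at h2
        split_ifs at h2 <;> omega

-- the main lockstep invariant between A's mutated counter and B's (openT, nxt, q) state
theorem validgroup_main (k : Int) (hk : 1 ≤ k) (c : PySem.Dict Int Int)
    (hg : ∀ u, 0 ≤ c.getD u 0) :
    ∀ (ks : List Int) (dA : PySem.Dict Int Int) (openT nxt prev : Int) (q : List (Int × Int)),
    ks.Pairwise (· < ·) →
    (∀ v ∈ ks, prev < v) →
    (∀ u, 0 < c.getD u 0 → prev < u → u ∈ ks) →
    (∀ u, prev < u → dA.getD u 0 = c.getD u 0 - pvPend q u) →
    (∀ u, prev < u → 0 ≤ dA.getD u 0) →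
    openT = pvQsum q →
    (∀ p ∈ q, 0 < p.2) →
    (∀ p ∈ q, nxt ≤ p.1 ∧ p.1 ≤ nxt + k - 2) →
    q.Pairwise (fun p p' => p.1 < p'.1) →
    (q ≠ [] → nxt = prev + 1) →
    validgroupOuter k ks dA = validgroupAltLoop k c ks openT nxt q := by
  intro ks
  induction ks with
  | nil =>
    intro dA openT nxt prev q _ _ hmem hA h2 hsum hpos hbnd _ hnxt
    have h0 : openT = 0 := by
      rcases hq : q with _ | ⟨p, t⟩
      · subst hq; simpa [pvQsum] using hsum
      · exfalso
        have hqne : q ≠ [] := by rw [hq]; simp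
        rw [← hq] at *
        have hnn := hnxt hqne
        have hpend : pvPend q (prev + 1) = pvQsum q := by
          apply pvPend_eq_qsum
          intro p hp
          have := (hbnd p hp).1; omega
        have hda := hA (prev + 1) (by omega)
        have hd2 := h2 (prev + 1) (by omega)
        have hcle : c.getD (prev + 1) 0 ≤ 0 := by
          by_contra hc
          exact absurd (hmem (prev + 1) (by omega) (by omega)) (by simp)
        have := pvQsum_pos q hqne hpos
        omega
    simp [validgroupOuter, validgroupAltLoop, h0]
  | cons v rest ih =>
    intro dA openT nxt prev q hpw hprev hmem hA h2 hsum hpos hbnd hqpw hnxt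
    have hprevv : prev < v := hprev v List.mem_cons_self
    have hfreq : dA.getD v 0 = c.getD v 0 - pvPend q v := hA v hprevv
    have hf0 : 0 ≤ dA.getD v 0 := h2 v hprevv
    -- when q is nonempty the loop is at v = nxt
    have hvq : q ≠ [] → v = nxt := by
      intro hqne
      have hnn := hnxt hqne
      by_contra hne
      have hpend : pvPend q (prev + 1) = pvQsum q :=
        pvPend_eq_qsum q _ (fun p hp => by have := (hbnd p hp).1; omega)
      have hda := hA (prev + 1) (by omega)
      have hd2 := h2 (prev + 1) (by omega)
      have hqs := pvQsum_pos q hqne hpos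
      have hcpos : 0 < c.getD (prev + 1) 0 := by omega
      have hin := hmem (prev + 1) hcpos (by omega)
      rcases List.mem_cons.mp hin with hh | hh
      · exact hne (by omega)
      · have := (List.pairwise_cons.mp hpw).1 _ hh
        have := hprev (prev + 1) hin
        omega
    have hOT : openT = pvPend q v := by
      rcases hq : q with _ | ⟨p, t⟩
      · subst hq; simpa [pvQsum, pvPend] using hsum
      · have hqne : q ≠ [] := by rw [hq]; simp
        have hvn := hvq hqne
        rw [← hq, hsum]
        exact (pvPend_eq_qsum q v (fun p hp => by have := (hbnd p hp).1; omega)).symm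
    have hgapF : ¬ (openT > 0 ∧ v ≠ nxt) := by
      rintro ⟨hpos', hne⟩
      have hqne : q ≠ [] := by
        intro h; subst h; simp [pvQsum] at hsum; omega
      exact hne (hvq hqne)
    have hshF : ¬ (c.getD v 0 < openT) := by omega
    have hbnd' : ∀ p ∈ q, v ≤ p.1 ∧ p.1 ≤ v + k - 2 := by
      intro p hp
      have hqne : q ≠ [] := by intro h; subst h; simp at hp
      rw [hvq hqne]; exact hbnd p hp
    have hle : openT ≤ c.getD v 0 := by omega
    obtain ⟨s1, s2, s3, s4, s5⟩ := pvStep k v (c.getD v 0) openT q hk hsum hpos hbnd' hqpw hle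
    have hB : validgroupAltLoop k c (v :: rest) openT nxt q
        = validgroupAltLoop k c rest
            (validgroupPop v (c.getD v 0) (if c.getD v 0 > openT then q ++ [(v + k - 1, c.getD v 0 - openT)] else q)).1
            (v + 1)
            (validgroupPop v (c.getD v 0) (if c.getD v 0 > openT then q ++ [(v + k - 1, c.getD v 0 - openT)] else q)).2 := by
      simp [validgroupAltLoop, hgapF, hshF]
    have hrest : (rest.Pairwise (· < ·)) := (List.pairwise_cons.mp hpw).2
    have hrestgt : ∀ w ∈ rest, v < w := (List.pairwise_cons.mp hpw).1
    have hmem' : ∀ u, 0 < c.getD u 0 → v < u → u ∈ rest := by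
      intro u hcu hvu
      rcases List.mem_cons.mp (hmem u hcu (by omega)) with rfl | h
      · omega
      · exact h
    have hfree : c.getD v 0 - openT = dA.getD v 0 := by omega
    by_cases hApos : dA.getD v 0 > 0
    · -- A consumes the window [v, v+k)
      have hnd : (PySem.List.pyRange v (v + k) 1).Nodup := PySem.List.nodup_pyRange_one v (v + k)
      rcases validgroupInner_spec (dA.getD v 0) (PySem.List.pyRange v (v + k) 1) hnd dA with
        ⟨⟨i, hi, hilt⟩, hnone⟩ | ⟨hall, d', hsome, hd'⟩
      · -- A fails; B's continuation must fail too
        have hAeq : validgroupOuter k (v :: rest) dA = false := by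
          simp [validgroupOuter, hApos, hnone]
        rw [hAeq, hB]
        have hiR := (PySem.List.mem_pyRange_one).mp hi
        have hiv : i ≠ v := by intro h; rw [h] at hilt; omega
        by_contra hBtrue
        have hBtrue' : validgroupAltLoop k c rest
            (validgroupPop v (c.getD v 0) (if c.getD v 0 > openT then q ++ [(v + k - 1, c.getD v 0 - openT)] else q)).1
            (v + 1)
            (validgroupPop v (c.getD v 0) (if c.getD v 0 > openT then q ++ [(v + k - 1, c.getD v 0 - openT)] else q)).2 = true := by
          revert hBtrue
          cases validgroupAltLoop k c rest _ (v + 1) _ <;> simp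
        have hp := validgroupAlt_sound k hk c hg rest _ (v + 1) _ hrest
          (fun w hw => by have := hrestgt w hw; omega) s1 s2 s3 s4 hBtrue' i (by omega)
        have hpi := s5 i (by omega)
        have hAi := hA i (by omega)
        rw [hpi] at hp
        have hile : i ≤ v + k - 1 := by omega
        simp [hile] at hp
        omega
      · -- A succeeds on the window; recurse in lockstep
        have hAeq : validgroupOuter k (v :: rest) dA = validgroupOuter k rest d' := by
          simp [validgroupOuter, hApos, hsome]
        rw [hAeq, hB]
        apply ih d' _ (v + 1) v _ hrest hrestgt hmem' _ _ s1 s2 s3 s4 (fun _ => rfl)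
        · intro u hu
          have hdu := hd' u
          have hAu := hA u (by omega)
          have hpu := s5 u hu
          have hmemR : (u ∈ PySem.List.pyRange v (v + k) 1) ↔ (u ≤ v + k - 1) := by
            rw [PySem.List.mem_pyRange_one]; omega
          by_cases hcase : u ≤ v + k - 1
          · simp [hcase, hmemR.mpr hcase] at hdu hpu ⊢
            omega
          · have hnm : ¬ (u ∈ PySem.List.pyRange v (v + k) 1) := by rw [hmemR]; omega
            simp [hcase, hnm] at hdu hpu ⊢
            omega
        · intro u hu
          have hdu := hd' u
          by_cases hmemR : u ∈ PySem.List.pyRange v (v + k) 1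
          · have := hall u hmemR
            simp [hmemR] at hdu; omega
          · simp [hmemR] at hdu
            have := h2 u (by omega)
            omega
    · -- A skips this key (its count is already 0)
      have hA0 : dA.getD v 0 = 0 := by omega
      have hAeq : validgroupOuter k (v :: rest) dA = validgroupOuter k rest dA := by
        simp [validgroupOuter, hApos]
      rw [hAeq, hB]
      apply ih dA _ (v + 1) v _ hrest hrestgt hmem' _ _ s1 s2 s3 s4 (fun _ => rfl)
      · intro u hu
        have hpu := s5 u hu
        have hps : pvPend (validgroupPop v (c.getD v 0) (if c.getD v 0 > openT then q ++ [(v + k - 1, c.getD v 0 - openT)] else q)).2 u = pvPend q u := by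
          rw [hpu]; split_ifs <;> omega
        rw [hps]
        exact hA u (by omega)
      · intro u hu
        exact h2 u (by omega)

theorem validgroup_equiv (arr : List Int) (k : Int) (hk : 1 ≤ k) :
    validgroup arr k = validgroup_alt arr k := by
  unfold validgroup validgroup_alt
  by_cases hm : PySem.Int.mod (arr.length : Int) k ≠ 0
  · simp [hm]
  · simp only [hm, if_neg, not_false_eq_true]
    set c := PySem.Dict.counter arr with hc
    set keys := PySem.List.sorted c.keys (fun x => x) false with hkeys
    have hg : ∀ u, 0 ≤ c.getD u 0 := by
      intro u; rw [hc, PySem.Dict.getD_counter]; exact_mod_cast Int.natCast_nonneg _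
    have hsorted : keys.Pairwise (· < ·) := by
      rw [hkeys, hc, PySem.Dict.keys_counter]
      exact PySem.List.sorted_ofList_pairwise_lt arr
    have hmemk : ∀ u, 0 < c.getD u 0 → u ∈ keys := by
      intro u hu
      rw [hkeys, PySem.List.mem_sorted, hc, PySem.Dict.keys_counter]
      rw [hc, PySem.Dict.getD_counter] at hu
      have hmm : u ∈ arr := by
        rw [← List.count_pos_iff]
        exact_mod_cast hu
      simpa [PySem.Set.mem_ofList] using hmm
    have happ : ∀ prev : Int, (∀ v ∈ keys, prev < v) →
        validgroupOuter k keys c = validgroupAltLoop k c keys 0 0 [] := by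
      intro prev hprev
      apply validgroup_main k hk c hg keys c 0 0 prev [] hsorted hprev
        (fun u hu _ => hmemk u hu)
        (fun u _ => by simp [pvPend])
        (fun u _ => hg u)
        (by simp [pvQsum]) (by simp) (by simp) (by simp) (by simp)
    rcases hks : keys with _ | ⟨h0, t0⟩
    · rw [← hks]
      exact happ 0 (by rw [hks]; simp)
    · rw [← hks]
      refine happ (h0 - 1) ?_
      intro v hv
      rw [hks] at hv
      rcases List.mem_cons.mp hv with rfl | hv'
      · omega
      · have := (List.pairwise_cons.mp (hks ▸ hsorted)).1 v hv'
        omega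

-- ===== VERDICT (by name: the statement is the Claim_ definition above) =====
theorem validgroup_spec : Claim_equal_validgroup := by
  unfold Claim_equal_validgroup
  intro arr k _ hpre
  unfold Spec_validgroup
  exact validgroup_equiv arr k hpre
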